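-- pv_equiv track=rewrite | github.com/leejuhanKr/Algorithm | 프로그래머스/2/86052. 빛의 경로 사이클/빛의 경로 사이클.py | solution
-- ===== SOURCE A (Python) =====
-- def solution(grid):
--     R, C = len(grid), len(grid[0])
--     dxy = [(-1, 0), (0, 1), (1, 0), (0, -1)]  # 상우하좌
--     grf = [[[0,0,0,0] for _ in range(C)] for _ in range(R)]  # 상우하좌
--
--
--     def solve(x, y, d):
--         res = 0
--         while not grf[x][y][d]:
--             grf[x][y][d] = 1
--             x, y = (x+dxy[d][0]) % R, (y+dxy[d][1]) % C
--             if grid[x][y] == 'L': d = (d+1) % 4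
--             elif grid[x][y] == 'R': d = (d-1) % 4
--             res += 1
--         return res
--
--
--     ans = []
--     for i in range(R):
--         for j in range(C):
--             for k in range(4):
--                 if grf[i][j][k] == 0:
--                     ans.append(solve(i, j, k))
--     return sorted(ans)
-- ===== SOURCE B (Python) =====
-- def solution(grid):
--     # Cycle-leader decomposition: the beam-step map is a permutation of the
--     # 4*R*C states, so each cycle is counted once, at its minimal state, by
--     # walking forward until the walk drops to or below the start -- no
--     # visited table at all (O(1) extra space).
--     R, C = len(grid), len(grid[0])
--
--     def step(s):
--         x, y, d = s // (4 * C), (s // 4) % C, s % 4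
--         dx, dy = ((-1, 0), (0, 1), (1, 0), (0, -1))[d]
--         nx, ny = (x + dx) % R, (y + dy) % C
--         c = grid[nx][ny]
--         if c == 'L':
--             d = (d + 1) % 4
--         elif c == 'R':
--             d = (d - 1) % 4
--         return 4 * (nx * C + ny) + d
--
--     ans = []
--     for s in range(4 * R * C):
--         t, cnt = step(s), 1
--         while t > s:
--             t, cnt = step(t), cnt + 1
--         if t == s:
--             ans.append(cnt)
--     return sorted(ans)
-- ===== Notes on version B (the rewrite author's own statement) =====
-- stated objective: alternative
-- what changed: B drops A's visited table entirely: since the beam-step map is a permutation of the 4*R*C states, B counts each cycle exactly once at its minimal state by walking forward until the walk drops to or below the start (cycle-leader detection, O(1) extra space), instead of A's mark-and-walk over a 3-D visited array.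
import Mathlib
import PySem

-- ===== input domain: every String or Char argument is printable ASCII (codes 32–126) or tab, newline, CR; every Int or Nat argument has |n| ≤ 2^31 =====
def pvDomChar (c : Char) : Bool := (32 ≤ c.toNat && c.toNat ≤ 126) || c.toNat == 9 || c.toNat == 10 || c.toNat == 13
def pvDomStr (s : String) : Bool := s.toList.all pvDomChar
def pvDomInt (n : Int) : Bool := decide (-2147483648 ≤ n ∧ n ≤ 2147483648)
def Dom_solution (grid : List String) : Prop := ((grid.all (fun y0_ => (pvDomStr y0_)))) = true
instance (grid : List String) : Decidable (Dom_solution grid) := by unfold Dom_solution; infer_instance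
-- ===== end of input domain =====

-- B drops A's visited table: the beam-step map is a permutation of the 4*R*C states, so B
-- counts each cycle once at its minimal state by cycle-leader detection (walk forward until
-- the walk drops to or below the start); return values proved equal.

-- ===== PORT A =====
-- the dxy table of A
def pvDxy : List (Int × Int) := [(-1, 0), (0, 1), (1, 0), (0, -1)]

-- grf[x][y][d] read / write (indices are always in range when reached under Pre_)
def pvGet3 (g : List (List (List Int))) (x y d : Int) : Int :=
  PySem.List.pyGetD (PySem.List.pyGetD (PySem.List.pyGetD g x []) y []) d 0

def pvSet3 (g : List (List (List Int))) (x y d v : Int) : List (List (List Int)) :=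
  let row := PySem.List.pyGetD g x []
  let cell := PySem.List.pyGetD row y []
  PySem.List.pySetD g x (PySem.List.pySetD row y (PySem.List.pySetD cell d v))

-- A's inner 'solve' while-loop; 'fuel' is only a totality guard (each iteration marks a
-- fresh state, so the fuel passed by 'solution' is never exhausted under Pre_)
def pvSolveA (grid : List String) (R C : Int) :
    Nat → Int → Int → Int → List (List (List Int)) → Int → Int × List (List (List Int))
  | 0, _, _, _, g, res => (res, g)
  | Nat.succ fuel, x, y, d, g, res =>
    if pvGet3 g x y d = 0 then
      let g' := pvSet3 g x y d 1
      let dd := PySem.List.pyGetD pvDxy d (0, 0)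
      let x' := PySem.Int.mod (x + dd.1) R
      let y' := PySem.Int.mod (y + dd.2) C
      let c := PySem.Str.pyGet? (PySem.List.pyGetD grid x' "") y'
      let d' := if c = some 'L' then PySem.Int.mod (d + 1) 4
                else if c = some 'R' then PySem.Int.mod (d - 1) 4 else d
      pvSolveA grid R C fuel x' y' d' g' (res + 1)
    else (res, g)

def solution (grid : List String) : List Int :=
  let R : Int := (grid.length : Int)
  let C : Int := PySem.Str.len (PySem.List.pyGetD grid 0 "")
  let grf : List (List (List Int)) :=
    (PySem.List.pyRange 0 R).map (fun _ => (PySem.List.pyRange 0 C).map (fun _ => [0, 0, 0, 0]))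
  let fuel := (4 * R * C).toNat + 1
  let st :=
    (PySem.List.pyRange 0 R).foldl (fun st i =>
      (PySem.List.pyRange 0 C).foldl (fun st j =>
        (PySem.List.pyRange 0 4).foldl (fun st k =>
          if pvGet3 st.1 i j k = 0 then
            let p := pvSolveA grid R C fuel i j k st.1 0
            (p.2, st.2 ++ [p.1])
          else st) st) st) (grf, ([] : List Int))
  PySem.List.sorted st.2 (fun x => x) false

-- ===== PORT B =====
-- Source B's 'step': decode s, move, rotate, re-encode
def pvStep (grid : List String) (R C : Int) (s : Int) : Int :=
  let x := PySem.Int.floordiv s (4 * C)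
  let y := PySem.Int.mod (PySem.Int.floordiv s 4) C
  let d := PySem.Int.mod s 4
  let dd := PySem.List.pyGetD [((-1 : Int), (0 : Int)), (0, 1), (1, 0), (0, -1)] d (0, 0)
  let nx := PySem.Int.mod (x + dd.1) R
  let ny := PySem.Int.mod (y + dd.2) C
  let c := PySem.Str.pyGet? (PySem.List.pyGetD grid nx "") ny
  let nd := if c = some 'L' then PySem.Int.mod (d + 1) 4
            else if c = some 'R' then PySem.Int.mod (d - 1) 4 else d
  4 * (nx * C + ny) + nd

-- Source B's inner 'while t > s' leader walk; 'fuel' is only a totality guard (the walk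
-- returns to s within 4*R*C steps, so the fuel passed below is never exhausted)
def pvLead (grid : List String) (R C : Int) : Nat → Int → Int → Int → Int × Int
  | 0, _, t, cnt => (t, cnt)
  | Nat.succ fuel, s, t, cnt =>
    if s < t then pvLead grid R C fuel s (pvStep grid R C t) (cnt + 1) else (t, cnt)

-- Source B's 'for s in range(4*R*C)' loop building ans
def pvLeadAns (grid : List String) : List Int :=
  let R : Int := (grid.length : Int)
  let C : Int := PySem.Str.len (PySem.List.pyGetD grid 0 "")
  let n := 4 * R * C
  (PySem.List.pyRange 0 n).foldl (fun ans s =>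
    let p := pvLead grid R C (n.toNat + 1) s (pvStep grid R C s) 1
    if p.1 = s then ans ++ [p.2] else ans) []

def solution_alt (grid : List String) : List Int :=
  PySem.List.sorted (pvLeadAns grid) (fun x => x) false

-- ===== PRECONDITION & SPEC =====
-- Pre_ excludes exactly the inputs on which A raises IndexError: the empty grid
-- (grid[0]) and ragged grids with some row shorter than the first row (the walk
-- eventually reads every cell in the first len(grid[0]) columns of every row).
def Pre_solution (grid : List String) : Prop :=
  grid ≠ [] ∧ ∀ s ∈ grid, PySem.Str.len (PySem.List.pyGetD grid 0 "") ≤ PySem.Str.len s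
instance (grid : List String) : Decidable (Pre_solution grid) := by
  unfold Pre_solution; infer_instance

def pvWitness_solution : List String := ["SL", "LR"]

def Spec_solution (grid : List String) (out : List Int) : Prop := out = solution_alt grid
instance (grid : List String) (out : List Int) : Decidable (Spec_solution grid out) := by
  unfold Spec_solution; infer_instance

-- ===== CLAIM (what is proved, stated in full; the proofs are below) =====
def Claim_equal_solution : Prop :=
  ∀ (grid : List String), Dom_solution grid → Pre_solution grid → Spec_solution grid (solution grid)

-- ===== LEMMAS AND PROOFS =====

-- ---------- shared encode / decode infrastructure ----------
def pvEnc (C x y d : Int) : Int := 4 * (x * C + y) + d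

def pvValid (R C x y d : Int) : Prop :=
  0 ≤ x ∧ x < R ∧ 0 ≤ y ∧ y < C ∧ 0 ≤ d ∧ d < 4

def pvOk (R C s : Int) : Prop := 0 ≤ s ∧ s < 4 * R * C

-- the common successor-state computation (A computes it inline each step; B tabulates it)
def pvNxt (grid : List String) (R C x y d : Int) : Int × Int × Int :=
  let dd := PySem.List.pyGetD pvDxy d (0, 0)
  let x' := PySem.Int.mod (x + dd.1) R
  let y' := PySem.Int.mod (y + dd.2) C
  let c := PySem.Str.pyGet? (PySem.List.pyGetD grid x' "") y'
  let d' := if c = some 'L' then PySem.Int.mod (d + 1) 4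
            else if c = some 'R' then PySem.Int.mod (d - 1) 4 else d
  (x', y', d')

theorem pvEnc_bounds {R C x y d : Int} (h : pvValid R C x y d) :
    0 ≤ pvEnc C x y d ∧ pvEnc C x y d < 4 * R * C := by
  obtain ⟨h1, h2, h3, h4, h5, h6⟩ := h
  constructor
  · unfold pvEnc; nlinarith
  · unfold pvEnc; nlinarith

theorem pvEnc_decode_d {R C x y d : Int} (h : pvValid R C x y d) :
    PySem.Int.mod (pvEnc C x y d) 4 = d := by
  obtain ⟨h1, h2, h3, h4, h5, h6⟩ := h
  rw [PySem.Int.mod_eq_emod_of_pos (by norm_num)]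
  unfold pvEnc
  generalize x * C + y = q
  omega

theorem pvEnc_decode_y {R C x y d : Int} (h : pvValid R C x y d) :
    PySem.Int.mod (PySem.Int.floordiv (pvEnc C x y d) 4) C = y := by
  obtain ⟨h1, h2, h3, h4, h5, h6⟩ := h
  have hC : 0 < C := lt_of_le_of_lt h3 h4
  rw [PySem.Int.floordiv_eq_ediv_of_pos (by norm_num)]
  rw [PySem.Int.mod_eq_emod_of_pos hC]
  unfold pvEnc
  have : (4 * (x * C + y) + d) / 4 = x * C + y := by
    rw [show 4 * (x * C + y) + d = d + (x * C + y) * 4 by ring]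
    rw [Int.add_mul_ediv_right _ _ (by norm_num : (4:Int) ≠ 0)]
    rw [Int.ediv_eq_zero_of_lt h5 h6]; ring
  rw [this, show x * C + y = y + x * C by ring, Int.add_mul_emod_self_right]
  exact Int.emod_eq_of_lt h3 h4

theorem pvEnc_decode_x {R C x y d : Int} (h : pvValid R C x y d) :
    PySem.Int.floordiv (pvEnc C x y d) (4 * C) = x := by
  obtain ⟨h1, h2, h3, h4, h5, h6⟩ := h
  have hC : 0 < C := lt_of_le_of_lt h3 h4
  rw [PySem.Int.floordiv_eq_ediv_of_pos (by positivity)]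
  unfold pvEnc
  rw [show 4 * (x * C + y) + d = (4 * y + d) + x * (4 * C) by ring]
  rw [Int.add_mul_ediv_right _ _ (by positivity : (4 * C) ≠ 0)]
  rw [Int.ediv_eq_zero_of_lt (by omega) (by omega)]; ring

theorem pvEnc_inj {R C x y d x' y' d' : Int} (h : pvValid R C x y d)
    (h' : pvValid R C x' y' d') (he : pvEnc C x y d = pvEnc C x' y' d') :
    x = x' ∧ y = y' ∧ d = d' := by
  refine ⟨?_, ?_, ?_⟩
  · have := pvEnc_decode_x h; rw [he, pvEnc_decode_x h'] at this; omega
  · have := pvEnc_decode_y h; rw [he, pvEnc_decode_y h'] at this; omega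
  · have := pvEnc_decode_d h; rw [he, pvEnc_decode_d h'] at this; omega

theorem pvNxt_valid {grid : List String} {R C x y d : Int} (h : pvValid R C x y d) :
    pvValid R C (pvNxt grid R C x y d).1 (pvNxt grid R C x y d).2.1 (pvNxt grid R C x y d).2.2 := by
  obtain ⟨h1, h2, h3, h4, h5, h6⟩ := h
  have hR : 0 < R := lt_of_le_of_lt h1 h2
  have hC : 0 < C := lt_of_le_of_lt h3 h4
  unfold pvNxt
  refine ⟨PySem.Int.mod_nonneg _ hR, PySem.Int.mod_lt _ hR,
         PySem.Int.mod_nonneg _ hC, PySem.Int.mod_lt _ hC, ?_, ?_⟩ <;>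
  · dsimp only
    split_ifs <;>
      first
        | exact PySem.Int.mod_nonneg _ (by norm_num)
        | exact PySem.Int.mod_lt _ (by norm_num)
        | omega

theorem pvStep_enc {grid : List String} {R C x y d : Int} (h : pvValid R C x y d) :
    pvStep grid R C (pvEnc C x y d) =
      pvEnc C (pvNxt grid R C x y d).1 (pvNxt grid R C x y d).2.1 (pvNxt grid R C x y d).2.2 := by
  have hx := pvEnc_decode_x h
  have hy := pvEnc_decode_y h
  have hd := pvEnc_decode_d h
  unfold pvEnc at hx hy hd
  unfold pvStep pvNxt pvEnc
  simp only [pvDxy, hx, hy, hd]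
  rfl

-- decoding a valid flat state gives a valid triple that re-encodes to it
theorem pvDec_valid {R C s : Int} (hR : 0 ≤ R) (hC : 0 ≤ C) (hs : pvOk R C s) :
    pvValid R C (PySem.Int.floordiv s (4 * C))
      (PySem.Int.mod (PySem.Int.floordiv s 4) C) (PySem.Int.mod s 4) := by
  obtain ⟨h0, h1⟩ := hs
  have hn : 0 < 4 * R * C := lt_of_le_of_lt h0 h1
  have hR' : 0 < R := by nlinarith
  have hC' : 0 < C := by nlinarith
  refine ⟨?_, ?_, PySem.Int.mod_nonneg _ hC', PySem.Int.mod_lt _ hC',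
         PySem.Int.mod_nonneg _ (by norm_num), PySem.Int.mod_lt _ (by norm_num)⟩
  · rw [PySem.Int.floordiv_eq_ediv_of_pos (by positivity)]
    exact Int.ediv_nonneg h0 (by positivity)
  · rw [PySem.Int.floordiv_eq_ediv_of_pos (by positivity)]
    rw [Int.ediv_lt_iff_lt_mul (by positivity)]
    nlinarith

theorem pvEnc_dec {C s : Int} (hC : 0 < C) :
    pvEnc C (PySem.Int.floordiv s (4 * C))
      (PySem.Int.mod (PySem.Int.floordiv s 4) C) (PySem.Int.mod s 4) = s := by
  rw [PySem.Int.floordiv_eq_ediv_of_pos (by positivity),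
      PySem.Int.floordiv_eq_ediv_of_pos (by norm_num : (0:Int) < 4),
      PySem.Int.mod_eq_emod_of_pos hC,
      PySem.Int.mod_eq_emod_of_pos (by norm_num : (0:Int) < 4)]
  have h44 : s / (4 * C) = s / 4 / C := by
    rw [Int.ediv_ediv_eq_ediv_mul]; norm_num
  rw [h44]
  unfold pvEnc
  have e1 : C * (s / 4 / C) + s / 4 % C = s / 4 := Int.ediv_add_emod _ _
  have e2 : 4 * (s / 4) + s % 4 = s := Int.ediv_add_emod _ _
  nlinarith [e1, e2]

-- ---------- the inverse step: the beam-step map is injective on valid states ----------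
def pvPrev (grid : List String) (R C t : Int) : Int :=
  let nx := PySem.Int.floordiv t (4 * C)
  let ny := PySem.Int.mod (PySem.Int.floordiv t 4) C
  let nd := PySem.Int.mod t 4
  let c := PySem.Str.pyGet? (PySem.List.pyGetD grid nx "") ny
  let d := if c = some 'L' then PySem.Int.mod (nd - 1) 4
           else if c = some 'R' then PySem.Int.mod (nd + 1) 4 else nd
  let dd := PySem.List.pyGetD pvDxy d (0, 0)
  pvEnc C (PySem.Int.mod (nx - dd.1) R) (PySem.Int.mod (ny - dd.2) C) d

theorem pvMod_cancel {R : Int} (x a : Int) (hR : 0 < R) (h0 : 0 ≤ x) (h1 : x < R) :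
    PySem.Int.mod (PySem.Int.mod (x + a) R - a) R = x := by
  rw [PySem.Int.mod_eq_emod_of_pos hR, PySem.Int.mod_eq_emod_of_pos hR]
  conv_lhs => rw [Int.sub_emod, Int.emod_emod_of_dvd _ dvd_rfl, ← Int.sub_emod]
  rw [add_sub_cancel_right]
  exact Int.emod_eq_of_lt h0 h1

theorem pvMod4_cancel_sub (d : Int) (h0 : 0 ≤ d) (h1 : d < 4) :
    PySem.Int.mod (PySem.Int.mod (d + 1) 4 - 1) 4 = d := by
  rw [PySem.Int.mod_eq_emod_of_pos (by norm_num), PySem.Int.mod_eq_emod_of_pos (by norm_num)]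
  omega

theorem pvMod4_cancel_add (d : Int) (h0 : 0 ≤ d) (h1 : d < 4) :
    PySem.Int.mod (PySem.Int.mod (d - 1) 4 + 1) 4 = d := by
  rw [PySem.Int.mod_eq_emod_of_pos (by norm_num), PySem.Int.mod_eq_emod_of_pos (by norm_num)]
  omega

theorem pvPrev_step {grid : List String} {R C x y d : Int} (h : pvValid R C x y d) :
    pvPrev grid R C (pvStep grid R C (pvEnc C x y d)) = pvEnc C x y d := by
  obtain ⟨h1, h2, h3, h4, h5, h6⟩ := h
  have hR : 0 < R := lt_of_le_of_lt h1 h2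
  have hC : 0 < C := lt_of_le_of_lt h3 h4
  have hv : pvValid R C x y d := ⟨h1, h2, h3, h4, h5, h6⟩
  have hv' := pvNxt_valid (grid := grid) hv
  rw [pvStep_enc hv]
  unfold pvPrev
  rw [pvEnc_decode_x hv', pvEnc_decode_y hv', pvEnc_decode_d hv']
  simp only [pvNxt]
  split_ifs with hL hR'
  · rw [pvMod4_cancel_sub d h5 h6]
    rw [pvMod_cancel x _ hR h1 h2, pvMod_cancel y _ hC h3 h4]
  · rw [pvMod4_cancel_add d h5 h6]
    rw [pvMod_cancel x _ hR h1 h2, pvMod_cancel y _ hC h3 h4]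
  · rw [pvMod_cancel x _ hR h1 h2, pvMod_cancel y _ hC h3 h4]

theorem pvStep_inj {grid : List String} {R C a b : Int} (hR : 0 ≤ R) (hC : 0 ≤ C)
    (ha : pvOk R C a) (hb : pvOk R C b)
    (he : pvStep grid R C a = pvStep grid R C b) : a = b := by
  have hCpos : 0 < C := by
    obtain ⟨h0, h1⟩ := ha
    have : 0 < 4 * R * C := lt_of_le_of_lt h0 h1
    nlinarith
  have hea := pvEnc_dec (C := C) (s := a) hCpos
  have heb := pvEnc_dec (C := C) (s := b) hCpos
  have hva := pvDec_valid hR hC ha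
  have hvb := pvDec_valid hR hC hb
  have h1 : pvPrev grid R C (pvStep grid R C a) = a := by
    conv_lhs => rw [← hea]
    rw [pvPrev_step hva, hea]
  have h2 : pvPrev grid R C (pvStep grid R C b) = b := by
    conv_lhs => rw [← heb]
    rw [pvPrev_step hvb, heb]
  rw [← h1, ← h2, he]

-- ---------- iterates of the step map ----------
theorem pvStep_ok {grid : List String} {R C s : Int} (hR : 0 ≤ R) (hC : 0 ≤ C)
    (hs : pvOk R C s) : pvOk R C (pvStep grid R C s) := by
  have hCpos : 0 < C := by
    obtain ⟨h0, h1⟩ := hs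
    have : 0 < 4 * R * C := lt_of_le_of_lt h0 h1
    nlinarith
  have hv := pvDec_valid hR hC hs
  have he := pvEnc_dec (C := C) (s := s) hCpos
  rw [← he, pvStep_enc hv]
  exact pvEnc_bounds (pvNxt_valid hv)

theorem pvIter_ok {grid : List String} {R C s : Int} (hR : 0 ≤ R) (hC : 0 ≤ C)
    (hs : pvOk R C s) : ∀ k, pvOk R C ((pvStep grid R C)^[k] s) := by
  intro k
  induction k with
  | zero => simpa using hs
  | succ k ih =>
    rw [Function.iterate_succ_apply']
    exact pvStep_ok hR hC ih

theorem pvIter_inj {grid : List String} {R C a b : Int} (hR : 0 ≤ R) (hC : 0 ≤ C)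
    (ha : pvOk R C a) (hb : pvOk R C b) :
    ∀ k, (pvStep grid R C)^[k] a = (pvStep grid R C)^[k] b → a = b := by
  intro k
  induction k with
  | zero => simp
  | succ k ih =>
    rw [Function.iterate_succ_apply', Function.iterate_succ_apply']
    intro h
    exact ih (pvStep_inj hR hC (pvIter_ok hR hC ha k) (pvIter_ok hR hC hb k) h)

theorem pvIter_cancel {grid : List String} {R C s : Int} (hR : 0 ≤ R) (hC : 0 ≤ C)
    (hs : pvOk R C s) {i m : Nat}
    (h : (pvStep grid R C)^[i + m] s = (pvStep grid R C)^[i] s) :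
    (pvStep grid R C)^[m] s = s := by
  have h' : (pvStep grid R C)^[i] ((pvStep grid R C)^[m] s) = (pvStep grid R C)^[i] s := by
    rw [← Function.iterate_add_apply]; exact h
  exact pvIter_inj hR hC (pvIter_ok hR hC hs m) hs i h'

theorem pvExists_ret {grid : List String} {R C s : Int} (hR : 0 ≤ R) (hC : 0 ≤ C)
    (hs : pvOk R C s) :
    ∃ m : Nat, 0 < m ∧ m ≤ (4 * R * C).toNat ∧ (pvStep grid R C)^[m] s = s := by
  have hcard : (Finset.Ico (0:Int) (4 * R * C)).card < (Finset.range ((4 * R * C).toNat + 1)).card := by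
    rw [Int.card_Ico, Finset.card_range]
    omega
  have hmaps : Set.MapsTo (fun i : Nat => (pvStep grid R C)^[i] s)
      ↑(Finset.range ((4 * R * C).toNat + 1)) ↑(Finset.Ico (0:Int) (4 * R * C)) := by
    intro i _
    have h := pvIter_ok (grid := grid) hR hC hs i
    simp only [Finset.coe_Ico, Set.mem_Ico]
    exact ⟨h.1, h.2⟩
  obtain ⟨i, hi, j, hj, hne, heq⟩ :=
    Finset.exists_ne_map_eq_of_card_lt_of_maps_to hcard hmaps
  simp only [Finset.mem_range] at hi hj
  rcases Nat.lt_or_ge i j with hij | hij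
  · refine ⟨j - i, by omega, by omega, ?_⟩
    exact pvIter_cancel hR hC hs (i := i) (m := j - i)
      (by rw [show i + (j - i) = j by omega]; exact heq.symm)
  · have hij' : j < i := by omega
    refine ⟨i - j, by omega, by omega, ?_⟩
    exact pvIter_cancel hR hC hs (i := j) (m := i - j)
      (by rw [show j + (i - j) = i by omega]; exact heq)

theorem pvIter_mod {grid : List String} {R C s : Int} {p : Nat}
    (hp : (pvStep grid R C)^[p] s = s) (k : Nat) :
    (pvStep grid R C)^[k] s = (pvStep grid R C)^[k % p] s := by
  have aux : ∀ q r : Nat, (pvStep grid R C)^[p * q + r] s = (pvStep grid R C)^[r] s := by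
    intro q
    induction q with
    | zero => simp
    | succ q ih =>
      intro r
      have : p * (q + 1) + r = (p * q + r) + p := by ring
      rw [this, Function.iterate_add_apply, hp, ih]
  rcases Nat.eq_zero_or_pos p with h0 | h0
  · simp [h0]
  · conv_lhs => rw [show k = p * (k / p) + k % p from (Nat.div_add_mod k p).symm]
    exact aux _ _

-- ---------- characterization of B's leader walk ----------
theorem pvLead_run {grid : List String} {R C s : Int} {j : Nat}
    (hj1 : 1 ≤ j) (hle : (pvStep grid R C)^[j] s ≤ s)
    (hgt : ∀ i, 1 ≤ i → i < j → s < (pvStep grid R C)^[i] s) :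
    ∀ (fuel : Nat) (c : Nat), 1 ≤ c → c ≤ j → j - c ≤ fuel →
      pvLead grid R C fuel s ((pvStep grid R C)^[c] s) (c : Int) =
        ((pvStep grid R C)^[j] s, (j : Int)) := by
  intro fuel
  induction fuel with
  | zero =>
    intro c hc1 hcj hf
    have : c = j := by omega
    subst this
    rfl
  | succ fuel ih =>
    intro c hc1 hcj hf
    by_cases hc : c = j
    · subst hc
      show (if s < (pvStep grid R C)^[c] s then _ else _) = _
      rw [if_neg (not_lt.mpr hle)]
    · have hlt : c < j := by omega
      show (if s < (pvStep grid R C)^[c] s then _ else _) = _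
      rw [if_pos (hgt c hc1 hlt)]
      rw [← Function.iterate_succ_apply' (pvStep grid R C) c s]
      have : ((c : Int) + 1) = ((c + 1 : Nat) : Int) := by push_cast; ring
      rw [this]
      exact ih (c + 1) (by omega) (by omega) (by omega)

-- ---------- characterization of the flat mark-walk (proof model of A's inner loop) ----------
def pvFollow (grid : List String) (R C : Int) : Nat → Int → List Bool → Int → Int × List Bool
  | 0, _, vis, cnt => (cnt, vis)
  | Nat.succ fuel, t, vis, cnt =>
    if PySem.List.pyGetD vis t false = false then
      pvFollow grid R C fuel (pvStep grid R C t) (PySem.List.pySetD vis t true) (cnt + 1)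
    else (cnt, vis)

def pvMarks (vis : List Bool) (l : List Int) : List Bool :=
  l.foldl (fun v t => PySem.List.pySetD v t true) vis

-- Int-index get-after-set
theorem pyGetD_pySetD_int {α : Type} (xs : List α) (i j : Int) (v dflt : α)
    (hi0 : 0 ≤ i) (hi1 : i < xs.length) (hj0 : 0 ≤ j) (hj1 : j < xs.length) :
    PySem.List.pyGetD (PySem.List.pySetD xs i v) j dflt =
      if j = i then v else PySem.List.pyGetD xs j dflt := by
  have hi : i = ((i.toNat : Nat) : Int) := (Int.toNat_of_nonneg hi0).symm
  have hj : j = ((j.toNat : Nat) : Int) := (Int.toNat_of_nonneg hj0).symm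
  rw [hi, hj, PySem.List.pyGetD_pySetD_natCast xs i.toNat j.toNat v dflt (by omega)]
  by_cases h : j = i
  · simp [h]
  · have : j.toNat ≠ i.toNat := by omega
    rw [if_neg this, if_neg (by exact_mod_cast this)]

theorem length_pySetD_int {α : Type} (xs : List α) (i : Int) (v : α)
    (hi0 : 0 ≤ i) (hi1 : i < xs.length) :
    (PySem.List.pySetD xs i v).length = xs.length := by
  have hi : i = ((i.toNat : Nat) : Int) := (Int.toNat_of_nonneg hi0).symm
  rw [hi]
  unfold PySem.List.pySetD
  rw [PySem.List.pySet?_natCast xs i.toNat v (by omega)]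
  simp

theorem pySetD_eq_set {α : Type} (xs : List α) (i : Int) (v : α)
    (hi0 : 0 ≤ i) (hi1 : i < xs.length) :
    PySem.List.pySetD xs i v = xs.set i.toNat v := by
  have hi : i = ((i.toNat : Nat) : Int) := (Int.toNat_of_nonneg hi0).symm
  rw [hi]
  unfold PySem.List.pySetD
  rw [PySem.List.pySet?_natCast xs i.toNat v (by omega)]
  rfl

theorem pvMarks_length (l : List Int) : ∀ (vis : List Bool),
    (∀ t ∈ l, 0 ≤ t ∧ t < vis.length) → (pvMarks vis l).length = vis.length := by
  induction l with
  | nil => intro vis _; rfl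
  | cons a l ih =>
    intro vis hb
    have ha := hb a (List.mem_cons_self ..)
    show (pvMarks (PySem.List.pySetD vis a true) l).length = _
    rw [ih _ (fun t ht => by
      rw [length_pySetD_int vis a true ha.1 ha.2]
      exact hb t (List.mem_cons_of_mem _ ht))]
    exact length_pySetD_int vis a true ha.1 ha.2

theorem pvMarks_get (l : List Int) : ∀ (vis : List Bool) (t : Int),
    (∀ u ∈ l, 0 ≤ u ∧ u < vis.length) → 0 ≤ t → t < vis.length →
    (PySem.List.pyGetD (pvMarks vis l) t false = true ↔
      t ∈ l ∨ PySem.List.pyGetD vis t false = true) := by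
  induction l with
  | nil => intro vis t _ _ _; simp [pvMarks]
  | cons a l ih =>
    intro vis t hb ht0 ht1
    have ha := hb a (List.mem_cons_self ..)
    have hlen := length_pySetD_int vis a true ha.1 ha.2
    show PySem.List.pyGetD (pvMarks (PySem.List.pySetD vis a true) l) t false = true ↔ _
    rw [ih _ t (fun u hu => by rw [hlen]; exact hb u (List.mem_cons_of_mem _ hu))
        ht0 (by rw [hlen]; exact_mod_cast ht1)]
    rw [pyGetD_pySetD_int vis a t true false ha.1 ha.2 ht0 ht1]
    by_cases he : t = a
    · simp [he]
    · simp [he]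

theorem pvMarks_append (vis : List Bool) (l : List Int) (t : Int) :
    pvMarks vis (l ++ [t]) = PySem.List.pySetD (pvMarks vis l) t true := by
  unfold pvMarks
  rw [List.foldl_append]
  rfl

theorem pvWalk_run {grid : List String} {R C s : Int} {p : Nat} (hR : 0 ≤ R) (hC : 0 ≤ C)
    (hs : pvOk R C s) (hp1 : 0 < p) (hret : (pvStep grid R C)^[p] s = s)
    (hmin : ∀ i, 0 < i → i < p → (pvStep grid R C)^[i] s ≠ s)
    (vis : List Bool) (hlen : (vis.length : Int) = 4 * R * C)
    (hfresh : ∀ i : Nat, PySem.List.pyGetD vis ((pvStep grid R C)^[i] s) false = false) :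
    ∀ (fuel : Nat) (c : Nat), c ≤ p → p - c < fuel →
      pvFollow grid R C fuel ((pvStep grid R C)^[c] s)
          (pvMarks vis ((List.range c).map (fun i => (pvStep grid R C)^[i] s))) (c : Int) =
        ((p : Int), pvMarks vis ((List.range p).map (fun i => (pvStep grid R C)^[i] s))) := by
  intro fuel
  induction fuel with
  | zero => intro c hc hf; omega
  | succ fuel ih =>
    intro c hc hf
    have hb : ∀ u ∈ (List.range c).map (fun i => (pvStep grid R C)^[i] s),
        0 ≤ u ∧ u < (vis.length : Int) := by
      intro u hu
      simp only [List.mem_map, List.mem_range] at hu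
      obtain ⟨i, _, rfl⟩ := hu
      exact ⟨(pvIter_ok hR hC hs i).1, by rw [hlen]; exact (pvIter_ok hR hC hs i).2⟩
    have hcur_ok := pvIter_ok (grid := grid) hR hC hs c
    have hcur_lt : (pvStep grid R C)^[c] s < (vis.length : Int) := by
      rw [hlen]; exact hcur_ok.2
    have hread := pvMarks_get ((List.range c).map (fun i => (pvStep grid R C)^[i] s)) vis
      ((pvStep grid R C)^[c] s) hb hcur_ok.1 hcur_lt
    by_cases hcp : c = p
    · subst hcp
      have hmem : (pvStep grid R C)^[c] s ∈
          (List.range c).map (fun i => (pvStep grid R C)^[i] s) := by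
        refine List.mem_map.mpr ⟨0, List.mem_range.mpr hp1, ?_⟩
        simpa using hret.symm
      have htrue := hread.mpr (Or.inl hmem)
      show (if PySem.List.pyGetD
            (pvMarks vis ((List.range c).map (fun i => (pvStep grid R C)^[i] s)))
            ((pvStep grid R C)^[c] s) false = false then _ else _) = _
      rw [htrue]
      simp
    · have hclt : c < p := by omega
      have hfalse : PySem.List.pyGetD
          (pvMarks vis ((List.range c).map (fun i => (pvStep grid R C)^[i] s)))
          ((pvStep grid R C)^[c] s) false = false := by
        rcases Bool.eq_false_or_eq_true (PySem.List.pyGetD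
            (pvMarks vis ((List.range c).map (fun i => (pvStep grid R C)^[i] s)))
            ((pvStep grid R C)^[c] s) false) with hval | hval
        · exfalso
          rcases hread.mp hval with hmem | hvis
          · simp only [List.mem_map, List.mem_range] at hmem
            obtain ⟨i, hilt, hie⟩ := hmem
            have : (pvStep grid R C)^[i + (c - i)] s = (pvStep grid R C)^[i] s := by
              rw [show i + (c - i) = c by omega]; exact hie.symm
            have hcan := pvIter_cancel hR hC hs this
            exact hmin (c - i) (by omega) (by omega) hcan
          · rw [hfresh c] at hvis
            exact absurd hvis (by simp)
        · exact hval
      show (if PySem.List.pyGetD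
            (pvMarks vis ((List.range c).map (fun i => (pvStep grid R C)^[i] s)))
            ((pvStep grid R C)^[c] s) false = false then _ else _) = _
      rw [if_pos hfalse]
      have e1 : pvStep grid R C ((pvStep grid R C)^[c] s) = (pvStep grid R C)^[c + 1] s :=
        (Function.iterate_succ_apply' (pvStep grid R C) c s).symm
      have e2 : PySem.List.pySetD
          (pvMarks vis ((List.range c).map (fun i => (pvStep grid R C)^[i] s)))
          ((pvStep grid R C)^[c] s) true =
          pvMarks vis ((List.range (c + 1)).map (fun i => (pvStep grid R C)^[i] s)) := by
        rw [List.range_succ, List.map_append]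
        simp only [List.map_cons, List.map_nil]
        rw [pvMarks_append]
      have e3 : (c : Int) + 1 = ((c + 1 : Nat) : Int) := by push_cast; ring
      rw [e1, e2, e3]
      exact ih (c + 1) (by omega) (by omega)

-- ---------- stage 1 : A's nested-table program equals the flat mark-walk program ----------
def pvFlatAns (grid : List String) : List Int :=
  let R : Int := (grid.length : Int)
  let C : Int := PySem.Str.len (PySem.List.pyGetD grid 0 "")
  let n := 4 * R * C
  ((PySem.List.pyRange 0 n).foldl (fun st s =>
      if PySem.List.pyGetD st.1 s false = false then
        let p := pvFollow grid R C (n.toNat + 1) s st.1 0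
        (p.2, st.2 ++ [p.1])
      else st) (List.replicate n.toNat false, ([] : List Int))).2

-- shape of A's nested table
def pvShape (R C : Int) (g : List (List (List Int))) : Prop :=
  g.length = R.toNat ∧ ∀ row ∈ g, row.length = C.toNat ∧ ∀ cell ∈ row, cell.length = 4

-- simulation relation between A's nested table and the flat visited array
def pvRep (R C : Int) (g : List (List (List Int))) (vis : List Bool) : Prop :=
  vis.length = (4 * R * C).toNat ∧
  ∀ x y d, pvValid R C x y d →
    pvGet3 g x y d = (if PySem.List.pyGetD vis (pvEnc C x y d) false then 1 else 0)

theorem pvShape_set3 {R C : Int} {g : List (List (List Int))} {x y d v : Int}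
    (hs : pvShape R C g) (h : pvValid R C x y d) :
    pvShape R C (pvSet3 g x y d v) := by
  obtain ⟨h1, h2, h3, h4, h5, h6⟩ := h
  obtain ⟨hg, hrows⟩ := hs
  have hxg : x < (g.length : Int) := by omega
  unfold pvSet3
  have hrow_mem : PySem.List.pyGetD g x [] ∈ g := by
    rw [PySem.List.pyGetD_eq_getElem g [] h1 hxg]
    exact List.getElem_mem _
  obtain ⟨hrl, hcells⟩ := hrows _ hrow_mem
  have hyl : y < ((PySem.List.pyGetD g x []).length : Int) := by omega
  have hcell_mem : PySem.List.pyGetD (PySem.List.pyGetD g x []) y [] ∈ PySem.List.pyGetD g x [] := by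
    rw [PySem.List.pyGetD_eq_getElem _ [] h3 hyl]
    exact List.getElem_mem _
  have hcl := (hcells _ hcell_mem)
  have hdl : d < ((PySem.List.pyGetD (PySem.List.pyGetD g x []) y []).length : Int) := by omega
  constructor
  · rw [length_pySetD_int _ _ _ h1 hxg]; exact hg
  · intro row hrow
    rw [pySetD_eq_set _ _ _ h1 hxg] at hrow
    rcases List.mem_or_eq_of_mem_set hrow with hmem | heq
    · exact hrows _ hmem
    · subst heq
      constructor
      · rw [length_pySetD_int _ _ _ h3 hyl]; exact hrl
      · intro cell hcell
        rw [pySetD_eq_set _ _ _ h3 hyl] at hcell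
        rcases List.mem_or_eq_of_mem_set hcell with hmem | heq
        · exact hcells _ hmem
        · subst heq
          rw [length_pySetD_int _ _ _ h5 hdl]; exact hcl

theorem pvGet3_set3 {R C : Int} {g : List (List (List Int))} {x y d x' y' d' v : Int}
    (hs : pvShape R C g) (h : pvValid R C x y d) (h' : pvValid R C x' y' d') :
    pvGet3 (pvSet3 g x y d v) x' y' d' =
      if x' = x ∧ y' = y ∧ d' = d then v else pvGet3 g x' y' d' := by
  obtain ⟨hg, hrows⟩ := hs
  obtain ⟨h1, h2, h3, h4, h5, h6⟩ := h
  obtain ⟨h1', h2', h3', h4', h5', h6'⟩ := h'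
  have hxg : x < (g.length : Int) := by omega
  have hxg' : x' < (g.length : Int) := by omega
  have hrow_mem : PySem.List.pyGetD g x [] ∈ g := by
    rw [PySem.List.pyGetD_eq_getElem g [] h1 hxg]; exact List.getElem_mem _
  have hrow_mem' : PySem.List.pyGetD g x' [] ∈ g := by
    rw [PySem.List.pyGetD_eq_getElem g [] h1' hxg']; exact List.getElem_mem _
  obtain ⟨hrl, hcells⟩ := hrows _ hrow_mem
  obtain ⟨hrl', hcells'⟩ := hrows _ hrow_mem'
  have hyl : y < ((PySem.List.pyGetD g x []).length : Int) := by omega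
  have hyl' : y' < ((PySem.List.pyGetD g x' []).length : Int) := by omega
  have hcell_mem : PySem.List.pyGetD (PySem.List.pyGetD g x []) y [] ∈ PySem.List.pyGetD g x [] := by
    rw [PySem.List.pyGetD_eq_getElem _ [] h3 hyl]; exact List.getElem_mem _
  have hcell_mem' : PySem.List.pyGetD (PySem.List.pyGetD g x' []) y' [] ∈ PySem.List.pyGetD g x' [] := by
    rw [PySem.List.pyGetD_eq_getElem _ [] h3' hyl']; exact List.getElem_mem _
  have hcl := hcells _ hcell_mem
  have hcl' := hcells' _ hcell_mem'
  have hdl : d < ((PySem.List.pyGetD (PySem.List.pyGetD g x []) y []).length : Int) := by omega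
  have hdl' : d' < ((PySem.List.pyGetD (PySem.List.pyGetD g x' []) y' []).length : Int) := by omega
  unfold pvGet3 pvSet3
  rw [pyGetD_pySetD_int g x x' _ [] h1 hxg h1' hxg']
  by_cases hx : x' = x
  · subst hx
    rw [if_pos rfl]
    rw [pyGetD_pySetD_int _ y y' _ [] h3 hyl h3' hyl']
    by_cases hy : y' = y
    · subst hy
      rw [if_pos rfl]
      rw [pyGetD_pySetD_int _ d d' _ 0 h5 hdl h5' hdl']
      by_cases hd : d' = d
      · subst hd
        rw [if_pos rfl, if_pos ⟨rfl, rfl, rfl⟩]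
      · rw [if_neg hd, if_neg (by simp [hd])]
    · rw [if_neg hy, if_neg (by simp [hy])]
  · rw [if_neg hx, if_neg (by simp [hx])]

theorem pvRep_mark {R C : Int} {g : List (List (List Int))} {vis : List Bool} {x y d : Int}
    (hs : pvShape R C g) (hr : pvRep R C g vis) (h : pvValid R C x y d) :
    pvRep R C (pvSet3 g x y d 1) (PySem.List.pySetD vis (pvEnc C x y d) true) := by
  obtain ⟨hlen, hval⟩ := hr
  have hb := pvEnc_bounds h
  have hlt : pvEnc C x y d < (vis.length : Int) := by omega
  constructor
  · rw [length_pySetD_int _ _ _ hb.1 hlt]; exact hlen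
  · intro x' y' d' h'
    have hb' := pvEnc_bounds h'
    have hlt' : pvEnc C x' y' d' < (vis.length : Int) := by omega
    rw [pvGet3_set3 hs h h']
    rw [pyGetD_pySetD_int vis _ _ _ false hb.1 hlt hb'.1 hlt']
    by_cases he : pvEnc C x' y' d' = pvEnc C x y d
    · obtain ⟨hx, hy, hd⟩ := pvEnc_inj h' h he
      simp [hx, hy, hd]
    · have hne : ¬ (x' = x ∧ y' = y ∧ d' = d) := by
        rintro ⟨rfl, rfl, rfl⟩; exact he rfl
      rw [if_neg hne, if_neg he]
      exact hval _ _ _ h'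

-- one unfolding step of A's solve, phrased via pvNxt
theorem pvSolveA_succ (grid : List String) (R C : Int) (fuel : Nat) (x y d : Int)
    (g : List (List (List Int))) (res : Int) :
    pvSolveA grid R C (fuel + 1) x y d g res =
      if pvGet3 g x y d = 0 then
        pvSolveA grid R C fuel (pvNxt grid R C x y d).1 (pvNxt grid R C x y d).2.1
          (pvNxt grid R C x y d).2.2 (pvSet3 g x y d 1) (res + 1)
      else (res, g) := by
  rfl

-- the lockstep simulation of A's inner loop and the flat mark-walk
theorem pvLockstep (grid : List String) (R C : Int) :
    ∀ (fuel : Nat) (x y d : Int) (g : List (List (List Int))) (vis : List Bool) (res : Int),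
      pvValid R C x y d → pvShape R C g → pvRep R C g vis →
      (pvSolveA grid R C fuel x y d g res).1 =
        (pvFollow grid R C fuel (pvEnc C x y d) vis res).1 ∧
      pvShape R C (pvSolveA grid R C fuel x y d g res).2 ∧
      pvRep R C (pvSolveA grid R C fuel x y d g res).2
        (pvFollow grid R C fuel (pvEnc C x y d) vis res).2 := by
  intro fuel
  induction fuel with
  | zero => intro x y d g vis res hv hs hr; exact ⟨rfl, hs, hr⟩
  | succ fuel ih =>
    intro x y d g vis res hv hs hr
    rw [pvSolveA_succ]
    have hcond : pvGet3 g x y d = (if PySem.List.pyGetD vis (pvEnc C x y d) false then 1 else 0) :=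
      hr.2 x y d hv
    by_cases hvisited : PySem.List.pyGetD vis (pvEnc C x y d) false = false
    · have hz : pvGet3 g x y d = 0 := by rw [hcond, hvisited]; simp
      rw [if_pos hz]
      show _ ∧ _ ∧ pvRep R C _ (pvFollow grid R C (fuel + 1) (pvEnc C x y d) vis res).2
      rw [show pvFollow grid R C (fuel + 1) (pvEnc C x y d) vis res =
            if PySem.List.pyGetD vis (pvEnc C x y d) false = false then
              pvFollow grid R C fuel (pvStep grid R C (pvEnc C x y d))
                (PySem.List.pySetD vis (pvEnc C x y d) true) (res + 1)
            else (res, vis) from rfl]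
      rw [if_pos hvisited, pvStep_enc hv]
      exact ih _ _ _ _ _ _ (pvNxt_valid hv) (pvShape_set3 hs hv) (pvRep_mark hs hr hv)
    · have hnz : ¬ pvGet3 g x y d = 0 := by
        rw [hcond]; simp at hvisited; simp [hvisited]
      rw [if_neg hnz]
      show _ ∧ _ ∧ pvRep R C _ (pvFollow grid R C (fuel + 1) (pvEnc C x y d) vis res).2
      rw [show pvFollow grid R C (fuel + 1) (pvEnc C x y d) vis res =
            if PySem.List.pyGetD vis (pvEnc C x y d) false = false then
              pvFollow grid R C fuel (pvStep grid R C (pvEnc C x y d))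
                (PySem.List.pySetD vis (pvEnc C x y d) true) (res + 1)
            else (res, vis) from rfl]
      rw [if_neg hvisited]
      exact ⟨rfl, hs, hr⟩

-- fold over a flatMap is a nested fold
theorem foldl_flatMap {α β γ : Type} (l : List α) (g : α → List β) (f : γ → β → γ) (init : γ) :
    (l.flatMap g).foldl f init = l.foldl (fun a x => (g x).foldl f a) init := by
  induction l generalizing init with
  | nil => rfl
  | cons x xs ih => rw [List.flatMap_cons, List.foldl_append, List.foldl_cons, ih]

-- the triple-index list A traverses
def pvTriples (R C : Int) : List (Int × Int × Int) :=
  (PySem.List.pyRange 0 R).flatMap (fun i =>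
    (PySem.List.pyRange 0 C).flatMap (fun j =>
      (PySem.List.pyRange 0 4).map (fun k => (i, j, k))))

theorem pvTriples_valid {R C : Int} :
    ∀ t ∈ pvTriples R C, pvValid R C t.1 t.2.1 t.2.2 := by
  intro t ht
  unfold pvTriples at ht
  simp only [List.mem_flatMap, List.mem_map, PySem.List.mem_pyRange_one] at ht
  obtain ⟨i, hi, j, hj, k, hk, rfl⟩ := ht
  exact ⟨hi.1, hi.2, hj.1, hj.2, hk.1, hk.2⟩

theorem nat_range_mul (a b : Nat) :
    List.range (a * b) = (List.range a).flatMap (fun i => (List.range b).map (fun j => i * b + j)) := by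
  induction a with
  | zero => simp
  | succ a ih =>
    rw [List.range_succ, List.flatMap_append,
        show (a + 1) * b = a * b + b by ring, List.range_add, ih]
    simp

theorem pyRange_nonneg_eq (m : Int) (hm : 0 ≤ m) :
    PySem.List.pyRange 0 m = (List.range m.toNat).map (fun k : Nat => (k : Int)) := by
  rw [PySem.List.pyRange_one, Int.sub_zero]
  exact List.map_congr_left (fun a _ => by omega)

theorem nat_triple_range (a b : Nat) :
    (List.range a).flatMap (fun i => (List.range b).flatMap (fun j =>
      (List.range 4).map (fun k => 4 * (i * b + j) + k))) = List.range (a * (b * 4)) := by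
  rw [nat_range_mul a (b * 4)]
  congr 1; funext i
  rw [nat_range_mul b 4, List.map_flatMap]
  congr 1; funext j
  rw [List.map_map]
  congr 1; funext k
  simp only [Function.comp]
  ring

-- the flat loop traverses exactly the encodings of A's triple list
theorem pvTriples_map_enc (R C : Int) (hR : 0 ≤ R) (hC : 0 ≤ C) :
    (pvTriples R C).map (fun t => pvEnc C t.1 t.2.1 t.2.2) = PySem.List.pyRange 0 (4 * R * C) := by
  have h4RC : (0:Int) ≤ 4 * R * C := by positivity
  have htoNat : (4 * R * C).toNat = R.toNat * (C.toNat * 4) := by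
    have h1 : ((R.toNat * (C.toNat * 4) : Nat) : Int) = 4 * R * C := by
      push_cast [Int.toNat_of_nonneg hR, Int.toNat_of_nonneg hC]; ring
    omega
  rw [pyRange_nonneg_eq _ h4RC, htoNat, ← nat_triple_range]
  unfold pvTriples
  rw [pyRange_nonneg_eq R hR, pyRange_nonneg_eq C hC,
      pyRange_nonneg_eq 4 (by norm_num)]
  rw [show Int.toNat 4 = 4 from rfl]
  rw [List.map_flatMap, List.flatMap_map, List.map_flatMap]
  congr 1; funext i
  rw [List.map_flatMap, List.flatMap_map, List.map_flatMap]
  congr 1; funext j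
  rw [List.map_map, List.map_map, List.map_map]
  congr 1; funext k
  simp only [Function.comp]
  unfold pvEnc
  have hCC : C = ((C.toNat : Nat) : Int) := (Int.toNat_of_nonneg hC).symm
  rw [hCC]; push_cast; simp only [Int.toNat_natCast]

-- the outer loops of A and of the flat program in lockstep
theorem pvOuter1 (grid : List String) (R C : Int) (fuel : Nat) :
    ∀ (ts : List (Int × Int × Int)) (g : List (List (List Int))) (vis : List Bool)
      (ansA ansB : List Int),
      (∀ t ∈ ts, pvValid R C t.1 t.2.1 t.2.2) → pvShape R C g → pvRep R C g vis → ansA = ansB →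
      (ts.foldl (fun st t =>
          if pvGet3 st.1 t.1 t.2.1 t.2.2 = 0 then
            let p := pvSolveA grid R C fuel t.1 t.2.1 t.2.2 st.1 0
            (p.2, st.2 ++ [p.1])
          else st) (g, ansA)).2 =
      ((ts.map (fun t => pvEnc C t.1 t.2.1 t.2.2)).foldl (fun st s =>
          if PySem.List.pyGetD st.1 s false = false then
            let p := pvFollow grid R C fuel s st.1 0
            (p.2, st.2 ++ [p.1])
          else st) (vis, ansB)).2 := by
  intro ts
  induction ts with
  | nil => intro g vis ansA ansB _ _ _ hans; simpa using hans
  | cons t ts ih =>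
    intro g vis ansA ansB hvalid hs hr hans
    have hv : pvValid R C t.1 t.2.1 t.2.2 := hvalid t (List.mem_cons_self ..)
    have hcond : pvGet3 g t.1 t.2.1 t.2.2 =
        (if PySem.List.pyGetD vis (pvEnc C t.1 t.2.1 t.2.2) false then 1 else 0) :=
      hr.2 _ _ _ hv
    rw [List.map_cons, List.foldl_cons, List.foldl_cons]
    by_cases hvisited : PySem.List.pyGetD vis (pvEnc C t.1 t.2.1 t.2.2) false = false
    · have hz : pvGet3 g t.1 t.2.1 t.2.2 = 0 := by rw [hcond, hvisited]; simp
      rw [if_pos hz, if_pos hvisited]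
      obtain ⟨heq, hs', hr'⟩ :=
        pvLockstep grid R C fuel t.1 t.2.1 t.2.2 g vis 0 hv hs hr
      exact ih _ _ _ _ (fun u hu => hvalid u (List.mem_cons_of_mem _ hu)) hs' hr'
        (by rw [hans, heq])
    · have hnz : ¬ pvGet3 g t.1 t.2.1 t.2.2 = 0 := by
        rw [hcond]; simp at hvisited; simp [hvisited]
      rw [if_neg hnz, if_neg hvisited]
      exact ih _ _ _ _ (fun u hu => hvalid u (List.mem_cons_of_mem _ hu)) hs hr hans

-- A's nested loops are the fold over pvTriples
theorem pvA_fold (grid : List String) (R C : Int) (fuel : Nat)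
    (g0 : List (List (List Int))) :
    ((PySem.List.pyRange 0 R).foldl (fun st i =>
        (PySem.List.pyRange 0 C).foldl (fun st j =>
          (PySem.List.pyRange 0 4).foldl (fun st k =>
            if pvGet3 st.1 i j k = 0 then
              let p := pvSolveA grid R C fuel i j k st.1 0
              (p.2, st.2 ++ [p.1])
            else st) st) st) (g0, ([] : List Int))) =
      (pvTriples R C).foldl (fun st t =>
        if pvGet3 st.1 t.1 t.2.1 t.2.2 = 0 then
          let p := pvSolveA grid R C fuel t.1 t.2.1 t.2.2 st.1 0
          (p.2, st.2 ++ [p.1])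
        else st) (g0, ([] : List Int)) := by
  unfold pvTriples
  rw [foldl_flatMap]
  congr 1
  funext st i
  rw [foldl_flatMap]
  congr 1

-- initial shape
theorem pvShape_init (R C : Int) :
    pvShape R C ((PySem.List.pyRange 0 R).map
      (fun _ => (PySem.List.pyRange 0 C).map (fun _ => ([0, 0, 0, 0] : List Int)))) := by
  constructor
  · rw [List.length_map, PySem.List.length_pyRange_one]; omega
  · intro row hrow
    rw [List.mem_map] at hrow
    obtain ⟨_, _, rfl⟩ := hrow
    constructor
    · rw [List.length_map, PySem.List.length_pyRange_one]; omega
    · intro cell hcell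
      rw [List.mem_map] at hcell
      obtain ⟨_, _, rfl⟩ := hcell
      rfl

-- initial simulation relation
theorem pvRep_init (R C : Int) :
    pvRep R C ((PySem.List.pyRange 0 R).map
        (fun _ => (PySem.List.pyRange 0 C).map (fun _ => ([0, 0, 0, 0] : List Int))))
      (List.replicate (4 * R * C).toNat false) := by
  constructor
  · exact List.length_replicate
  · intro x y d hv
    obtain ⟨h1, h2, h3, h4, h5, h6⟩ := hv
    have hb := pvEnc_bounds ⟨h1, h2, h3, h4, h5, h6⟩
    unfold pvGet3
    rw [PySem.List.pyGetD_map_pyRange_of_nonneg _ R x [] h1 h2,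
        PySem.List.pyGetD_map_pyRange_of_nonneg _ C y [] h3 h4]
    have h04 : ([0, 0, 0, 0] : List Int) = List.replicate 4 0 := rfl
    rw [h04, PySem.List.pyGetD_eq_getElem _ 0 h5 (by simp; omega), List.getElem_replicate]
    have hlen : pvEnc C x y d < ((List.replicate (4 * R * C).toNat (false : Bool)).length : Int) := by
      rw [List.length_replicate]; omega
    rw [PySem.List.pyGetD_eq_getElem _ false hb.1 hlen, List.getElem_replicate]
    simp

theorem pvStage1 (grid : List String) :
    solution grid = PySem.List.sorted (pvFlatAns grid) (fun x => x) false := by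
  simp only [solution, pvFlatAns]
  have hR : (0:Int) ≤ (grid.length : Int) := by positivity
  have hC : (0:Int) ≤ PySem.Str.len (PySem.List.pyGetD grid 0 "") := by
    rw [PySem.Str.len_eq]; positivity
  have h := pvOuter1 grid (grid.length : Int) (PySem.Str.len (PySem.List.pyGetD grid 0 ""))
    ((4 * (grid.length : Int) * PySem.Str.len (PySem.List.pyGetD grid 0 "")).toNat + 1)
    (pvTriples (grid.length : Int) (PySem.Str.len (PySem.List.pyGetD grid 0 "")))
    ((PySem.List.pyRange 0 (grid.length : Int)).map
      (fun _ => (PySem.List.pyRange 0 (PySem.Str.len (PySem.List.pyGetD grid 0 ""))).map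
        (fun _ => ([0, 0, 0, 0] : List Int))))
    (List.replicate (4 * (grid.length : Int) * PySem.Str.len (PySem.List.pyGetD grid 0 "")).toNat false)
    [] [] pvTriples_valid (pvShape_init _ _) (pvRep_init _ _) rfl
  rw [pvTriples_map_enc (grid.length : Int) (PySem.Str.len (PySem.List.pyGetD grid 0 "")) hR hC] at h
  rw [pvA_fold]
  congr 1

-- ---------- stage 2 : the flat mark-walk program equals B's leader program ----------
theorem pvReplicate_get (k : Nat) (t : Int) (h0 : 0 ≤ t) (h1 : t < (k : Int)) :
    PySem.List.pyGetD (List.replicate k false) t false = false := by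
  have hl : t < ((List.replicate k (false : Bool)).length : Int) := by
    rw [List.length_replicate]; exact_mod_cast h1
  rw [PySem.List.pyGetD_eq_getElem _ false h0 hl, List.getElem_replicate]

theorem pvOuter2 (grid : List String) (R C : Int) (hR : 0 ≤ R) (hC : 0 ≤ C) :
    ∀ (k : Nat) (s₀ : Int) (vis : List Bool) (ansA ansB : List Int),
      0 ≤ s₀ → s₀ + (k : Int) = 4 * R * C →
      (vis.length : Int) = 4 * R * C →
      (∀ t, pvOk R C t →
        (PySem.List.pyGetD vis t false = true ↔ ∃ m : Nat, (pvStep grid R C)^[m] t < s₀)) →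
      ansA = ansB →
      ((PySem.List.pyRange s₀ (4 * R * C)).foldl (fun st s =>
          if PySem.List.pyGetD st.1 s false = false then
            let p := pvFollow grid R C ((4 * R * C).toNat + 1) s st.1 0
            (p.2, st.2 ++ [p.1])
          else st) (vis, ansA)).2 =
        (PySem.List.pyRange s₀ (4 * R * C)).foldl (fun ans s =>
          let p := pvLead grid R C ((4 * R * C).toNat + 1) s (pvStep grid R C s) 1
          if p.1 = s then ans ++ [p.2] else ans) ansB := by
  intro k
  induction k with
  | zero =>
    intro s0 vis ansA ansB h0 hk hlen hinv hans
    rw [PySem.List.pyRange_one_eq_nil (by push_cast at hk; omega)]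
    simpa using hans
  | succ k ih =>
    intro s0 vis ansA ansB h0 hk hlen hinv hans
    have hs0lt : s0 < 4 * R * C := by push_cast at hk; omega
    have hok : pvOk R C s0 := ⟨h0, hs0lt⟩
    rw [PySem.List.pyRange_one_cons hs0lt]
    rw [List.foldl_cons, List.foldl_cons]
    by_cases hcase : ∃ m : Nat, (pvStep grid R C)^[m] s0 < s0
    · -- s0 is not the minimum of its cycle: A skips (visited), B's walk drops below s0
      obtain ⟨mw, hmw⟩ := hcase
      have hmw1 : 1 ≤ mw := by
        rcases Nat.eq_zero_or_pos mw with h | h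
        · subst h; simp only [Function.iterate_zero, id_eq] at hmw; omega
        · omega
      have hvis : PySem.List.pyGetD vis s0 false = true :=
        (hinv s0 hok).mpr ⟨mw, hmw⟩
      have hex : ∃ j : Nat, 1 ≤ j ∧ (pvStep grid R C)^[j] s0 ≤ s0 := ⟨mw, hmw1, le_of_lt hmw⟩
      obtain ⟨hJ1, hJle⟩ := Nat.find_spec hex
      have hgt : ∀ i, 1 ≤ i → i < Nat.find hex → s0 < (pvStep grid R C)^[i] s0 := by
        intro i hi1 hiJ
        by_contra hle
        exact Nat.find_min hex hiJ ⟨hi1, not_lt.mp hle⟩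
      obtain ⟨m0, hm01, hm0le, hm0ret⟩ := pvExists_ret (grid := grid) hR hC hok
      have hJle' : Nat.find hex ≤ (4 * R * C).toNat :=
        le_trans (Nat.find_min' hex ⟨hm01, le_of_eq hm0ret⟩) hm0le
      have hlead := pvLead_run (grid := grid) (R := R) (C := C) (s := s0)
        hJ1 hJle hgt ((4 * R * C).toNat + 1) 1 le_rfl hJ1 (by omega)
      rw [Function.iterate_one] at hlead
      simp only [Nat.cast_one] at hlead
      have hstrict : (pvStep grid R C)^[Nat.find hex] s0 < s0 := by
        rcases lt_or_eq_of_le hJle with h | h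
        · exact h
        · exfalso
          have hred := pvIter_mod (grid := grid) (R := R) (C := C) (s := s0) h mw
          have hJpos : 0 < Nat.find hex := hJ1
          have hmod_lt : mw % Nat.find hex < Nat.find hex := Nat.mod_lt _ hJpos
          have hmod_ne : mw % Nat.find hex ≠ 0 := by
            intro h0'
            rw [h0'] at hred
            simp only [Function.iterate_zero, id_eq] at hred
            omega
          exact Nat.find_min hex hmod_lt ⟨by omega, by rw [← hred]; exact le_of_lt hmw⟩
      have hA : (if PySem.List.pyGetD (vis, ansA).1 s0 false = false then
            let p := pvFollow grid R C ((4 * R * C).toNat + 1) s0 (vis, ansA).1 0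
            (p.2, (vis, ansA).2 ++ [p.1])
          else (vis, ansA)) = (vis, ansA) := by
        simp only [hvis]
        simp
      have hB : (let p := pvLead grid R C ((4 * R * C).toNat + 1) s0 (pvStep grid R C s0) 1
          if p.1 = s0 then ansB ++ [p.2] else ansB) = ansB := by
        simp only [hlead]
        rw [if_neg (ne_of_lt hstrict)]
      rw [hA, hB]
      refine ih (s0 + 1) vis ansA ansB (by omega) (by push_cast at hk ⊢; omega) hlen ?_ hans
      intro t ht
      rw [hinv t ht]
      constructor
      · rintro ⟨m, hm⟩; exact ⟨m, by omega⟩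
      · rintro ⟨m, hm⟩
        rcases lt_or_eq_of_le (Int.lt_add_one_iff.mp hm) with h | h
        · exact ⟨m, h⟩
        · exact ⟨mw + m, by rw [Function.iterate_add_apply, h]; exact hmw⟩
    · -- s0 is the minimum of its cycle: A walks and marks the whole cycle, B appends its length
      have hvis : PySem.List.pyGetD vis s0 false = false := by
        cases hval : PySem.List.pyGetD vis s0 false
        · rfl
        · exact absurd ((hinv s0 hok).mp hval) hcase
      have hexr : ∃ m : Nat, 0 < m ∧ (pvStep grid R C)^[m] s0 = s0 := by
        obtain ⟨m0, a, b, c⟩ := pvExists_ret (grid := grid) hR hC hok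
        exact ⟨m0, a, c⟩
      obtain ⟨hp1, hpret⟩ := Nat.find_spec hexr
      have hmin : ∀ i, 0 < i → i < Nat.find hexr → (pvStep grid R C)^[i] s0 ≠ s0 :=
        fun i h1 h2 he => Nat.find_min hexr h2 ⟨h1, he⟩
      have hple : Nat.find hexr ≤ (4 * R * C).toNat := by
        obtain ⟨m0, a, b, c⟩ := pvExists_ret (grid := grid) hR hC hok
        exact le_trans (Nat.find_min' hexr ⟨a, c⟩) b
      have hfresh : ∀ i : Nat,
          PySem.List.pyGetD vis ((pvStep grid R C)^[i] s0) false = false := by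
        intro i
        cases hval : PySem.List.pyGetD vis ((pvStep grid R C)^[i] s0) false
        · rfl
        · exfalso
          obtain ⟨m, hm⟩ := (hinv _ (pvIter_ok hR hC hok i)).mp hval
          exact hcase ⟨m + i, by rw [Function.iterate_add_apply]; exact hm⟩
      have hwalk := pvWalk_run (grid := grid) hR hC hok hp1 hpret hmin vis hlen hfresh
        ((4 * R * C).toNat + 1) 0 (by omega) (by omega)
      simp only [List.range_zero, List.map_nil, Function.iterate_zero, id_eq,
        Nat.cast_zero, show pvMarks vis [] = vis from rfl] at hwalk
      have hex : ∃ j : Nat, 1 ≤ j ∧ (pvStep grid R C)^[j] s0 ≤ s0 :=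
        ⟨Nat.find hexr, hp1, le_of_eq hpret⟩
      obtain ⟨hJ1, hJle⟩ := Nat.find_spec hex
      have hgt : ∀ i, 1 ≤ i → i < Nat.find hex → s0 < (pvStep grid R C)^[i] s0 := by
        intro i hi1 hiJ
        by_contra hle
        exact Nat.find_min hex hiJ ⟨hi1, not_lt.mp hle⟩
      have hJeq : (pvStep grid R C)^[Nat.find hex] s0 = s0 := by
        rcases lt_or_eq_of_le hJle with h | h
        · exact absurd ⟨Nat.find hex, h⟩ hcase
        · exact h
      have hJp : Nat.find hex = Nat.find hexr :=
        le_antisymm (Nat.find_min' hex ⟨hp1, le_of_eq hpret⟩)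
          (Nat.find_min' hexr ⟨by omega, hJeq⟩)
      have hlead := pvLead_run (grid := grid) (R := R) (C := C) (s := s0)
        hJ1 hJle hgt ((4 * R * C).toNat + 1) 1 le_rfl hJ1 (by omega)
      rw [Function.iterate_one] at hlead
      simp only [Nat.cast_one] at hlead
      have horb : ∀ u ∈ (List.range (Nat.find hexr)).map (fun i => (pvStep grid R C)^[i] s0),
          0 ≤ u ∧ u < (vis.length : Int) := by
        intro u hu
        simp only [List.mem_map, List.mem_range] at hu
        obtain ⟨i, _, rfl⟩ := hu
        exact ⟨(pvIter_ok hR hC hok i).1, by rw [hlen]; exact (pvIter_ok hR hC hok i).2⟩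
      have hA : (if PySem.List.pyGetD (vis, ansA).1 s0 false = false then
            let p := pvFollow grid R C ((4 * R * C).toNat + 1) s0 (vis, ansA).1 0
            (p.2, (vis, ansA).2 ++ [p.1])
          else (vis, ansA)) =
          (pvMarks vis ((List.range (Nat.find hexr)).map (fun i => (pvStep grid R C)^[i] s0)),
            ansA ++ [((Nat.find hexr : Nat) : Int)]) := by
        simp only [hvis, if_pos, hwalk]
      have hB : (let p := pvLead grid R C ((4 * R * C).toNat + 1) s0 (pvStep grid R C s0) 1
          if p.1 = s0 then ansB ++ [p.2] else ansB) =
          ansB ++ [((Nat.find hex : Nat) : Int)] := by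
        simp only [hlead]
        rw [if_pos hJeq]
      rw [hA, hB]
      have hmlen : ((pvMarks vis ((List.range (Nat.find hexr)).map
          (fun i => (pvStep grid R C)^[i] s0))).length : Int) = 4 * R * C := by
        rw [pvMarks_length _ _ (fun u hu => by
          obtain ⟨hu1, hu2⟩ := horb u hu
          exact ⟨hu1, by exact_mod_cast hu2⟩)]
        exact hlen
      refine ih (s0 + 1) _ _ _ (by omega) (by push_cast at hk ⊢; omega) hmlen ?_
        (by rw [hans, hJp])
      intro t ht
      have htlt : t < (vis.length : Int) := by rw [hlen]; exact ht.2
      rw [pvMarks_get _ vis t horb ht.1 htlt]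
      constructor
      · rintro (hmem | hvis')
        · simp only [List.mem_map, List.mem_range] at hmem
          obtain ⟨i, hilt, hie⟩ := hmem
          refine ⟨Nat.find hexr - i, ?_⟩
          rw [← hie, ← Function.iterate_add_apply,
            show Nat.find hexr - i + i = Nat.find hexr by omega, hpret]
          omega
        · obtain ⟨m, hm⟩ := (hinv t ht).mp hvis'
          exact ⟨m, by omega⟩
      · rintro ⟨m, hm⟩
        rcases lt_or_eq_of_le (Int.lt_add_one_iff.mp hm) with h | h
        · exact Or.inr ((hinv t ht).mpr ⟨m, h⟩)
        · left
          obtain ⟨q, hq1, _, hqret⟩ := pvExists_ret (grid := grid) hR hC ht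
          have hr : (pvStep grid R C)^[m % q] t = s0 := by
            rw [← pvIter_mod hqret m]; exact h
          have hrq : m % q < q := Nat.mod_lt _ hq1
          have hteq : (pvStep grid R C)^[q - m % q] s0 = t := by
            rw [← hr, ← Function.iterate_add_apply,
              show q - m % q + m % q = q by omega]
            exact hqret
          refine List.mem_map.mpr ⟨(q - m % q) % Nat.find hexr,
            List.mem_range.mpr (Nat.mod_lt _ hp1), ?_⟩
          rw [← pvIter_mod hpret]
          exact hteq

theorem pvStage2 (grid : List String) : pvFlatAns grid = pvLeadAns grid := by
  simp only [pvFlatAns, pvLeadAns]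
  have hR : (0:Int) ≤ (grid.length : Int) := by positivity
  have hC : (0:Int) ≤ PySem.Str.len (PySem.List.pyGetD grid 0 "") := by
    rw [PySem.Str.len_eq]; positivity
  set R : Int := (grid.length : Int) with hRdef
  set C : Int := PySem.Str.len (PySem.List.pyGetD grid 0 "") with hCdef
  have hn : (0:Int) ≤ 4 * R * C := by positivity
  refine pvOuter2 grid R C hR hC (4 * R * C).toNat 0 (List.replicate (4 * R * C).toNat false)
    [] [] le_rfl (by rw [Int.toNat_of_nonneg hn]; ring)
    (by rw [List.length_replicate]; exact Int.toNat_of_nonneg hn) ?_ rfl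
  intro t ht
  rw [pvReplicate_get _ _ ht.1 (by rw [Int.toNat_of_nonneg hn]; exact ht.2)]
  constructor
  · intro h; exact absurd h (by simp)
  · rintro ⟨m, hm⟩
    exact absurd hm (not_lt.mpr (pvIter_ok hR hC ht m).1)

-- ===== VERDICT (by name: the statement is the Claim_ definition above) =====
theorem solution_spec : Claim_equal_solution := by
  intro grid _ _
  unfold Spec_solution solution_alt
  rw [pvStage1, pvStage2]
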